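-- pv_equiv track=rewrite | github.com/omerlefaruk/CasareRPA | src/casare_rpa/utils/fuzzy_search.py | highlight_matches
-- ===== SOURCE A (Python) =====
-- from typing import List, Tuple, Optional, Set, Dict
--
-- def highlight_matches(text: str, positions: List[int]) -> str:
--     """
--     Create HTML string with matched characters highlighted.
--
--     Args:
--         text: Original text
--         positions: Indices of characters to highlight
--
--     Returns:
--         HTML string with <b> tags around matched characters
--     """
--     if not positions:
--         return text
--
--     result = []
--     pos_set = set(positions)
--
--     for i, char in enumerate(text):
--         if i in pos_set:
--             result.append(f"<b style='color: #FFA500;'>{char}</b>")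
--         else:
--             result.append(char)
--
--     return ''.join(result)
-- ===== SOURCE B (Python) =====
-- def highlight_matches(text, positions):
--     n = len(text)
--     valid = sorted({p for p in positions if 0 <= p < n})
--     parts = []
--     prev = 0
--     for p in valid:
--         parts.append(text[prev:p])
--         parts.append(f"<b style='color: #FFA500;'>{text[p]}</b>")
--         prev = p + 1
--     parts.append(text[prev:])
--     return ''.join(parts)
-- ===== Notes on version B (the rewrite author's own statement) =====
-- stated objective: alternative
-- what changed: B sorts the deduplicated in-range match positions once and stitches the output from unhighlighted slices plus wrapped characters with a moving cursor, instead of A's per-character scan with a set-membership test on every index.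
import Mathlib
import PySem

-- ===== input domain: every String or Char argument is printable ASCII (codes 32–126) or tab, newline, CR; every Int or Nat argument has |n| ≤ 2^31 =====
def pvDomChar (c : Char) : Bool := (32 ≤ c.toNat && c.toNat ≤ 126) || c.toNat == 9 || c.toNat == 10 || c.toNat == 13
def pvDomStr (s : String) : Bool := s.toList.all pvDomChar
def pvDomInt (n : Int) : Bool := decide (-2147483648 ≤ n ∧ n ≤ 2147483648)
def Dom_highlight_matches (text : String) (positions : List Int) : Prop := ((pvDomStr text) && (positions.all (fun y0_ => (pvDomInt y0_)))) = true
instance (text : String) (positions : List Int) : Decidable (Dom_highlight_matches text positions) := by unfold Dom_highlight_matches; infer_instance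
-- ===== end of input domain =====

-- B rebuilds the string from the sorted set of valid match positions with slices instead of
-- scanning every character with a set-membership test (objective: alternative decomposition).

-- the highlighted form of one character (the f-string both Pythons contain)
def pvWrap (c : Char) : List Char := "<b style='color: #FFA500;'>".toList ++ [c] ++ "</b>".toList

-- ===== PORT A =====
def highlight_matches (text : String) (positions : List Int) : String :=
  if positions = [] then text
  else
    let pos_set : PySem.Set Int := PySem.Set.ofList positions
    let result : List (List Char) :=
      (PySem.List.enumerate text.toList).foldl
        (fun acc ic => if ic.1 ∈ pos_set then acc ++ [pvWrap ic.2] else acc ++ [[ic.2]]) []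
    String.ofList (PySem.Chars.join [] result)

-- ===== PORT B =====
def highlight_matches_alt (text : String) (positions : List Int) : String :=
  let cs := text.toList
  let n : Int := (cs.length : Int)
  let valid : List Int :=
    PySem.List.sorted (PySem.Set.ofList (positions.filter (fun p => 0 ≤ p && p < n))) (fun x => x) false
  let st :=
    valid.foldl
      (fun (st : Int × List (List Char)) p =>
        (p + 1, st.2 ++ [PySem.List.slice cs (some st.1) (some p), pvWrap (PySem.List.pyGetD cs p ' ')]))
      (0, [])
  String.ofList (PySem.Chars.join [] (st.2 ++ [PySem.List.slice cs (some st.1) none]))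

-- ===== PRECONDITION & SPEC =====
def Spec_highlight_matches (text : String) (positions : List Int) (out : String) : Prop := out = highlight_matches_alt text positions
instance (text : String) (positions : List Int) (out : String) : Decidable (Spec_highlight_matches text positions out) := by unfold Spec_highlight_matches; infer_instance

-- ===== CLAIM (what is proved, stated in full; the proofs are below) =====
def Claim_equal_highlight_matches : Prop := ∀ (text : String) (positions : List Int), Dom_highlight_matches text positions → Spec_highlight_matches text positions (highlight_matches text positions)

-- ===== LEMMAS AND PROOFS =====

-- ''.join is List.flatten
theorem pvJoin_eq_flatten (l : List (List Char)) : PySem.Chars.join [] l = l.flatten := by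
  induction l with
  | nil => rw [PySem.Chars.join_nil]; rfl
  | cons a l ih =>
    cases l with
    | nil => rw [PySem.Chars.join_singleton]; simp
    | cons b m => rw [PySem.Chars.join_cons_cons, ih]; simp

-- canonical form: the text rendered character by character from index i, highlighting members of S
def pvRender (S : List Int) (i : Int) : List Char → List Char
  | [] => []
  | c :: cs => (if i ∈ S then pvWrap c else [c]) ++ pvRender S (i + 1) cs

theorem pvRender_no_mem (S : List Int) (i : Int) (l : List Char)
    (h : ∀ k : Nat, k < l.length → (i + (k : Int)) ∉ S) : pvRender S i l = l := by
  induction l generalizing i with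
  | nil => rfl
  | cons c cs ih =>
    have h0 : i ∉ S := by simpa using h 0 (by simp)
    have htail : pvRender S (i + 1) cs = cs := by
      refine ih (i + 1) (fun k hk => ?_)
      have := h (k + 1) (by simpa using Nat.succ_lt_succ hk)
      push_cast at this ⊢
      convert this using 2
      ring
    simp [pvRender, h0, htail]

theorem pvRender_append (S : List Int) (i : Int) (l₁ l₂ : List Char) :
    pvRender S i (l₁ ++ l₂) = pvRender S i l₁ ++ pvRender S (i + l₁.length) l₂ := by
  induction l₁ generalizing i with
  | nil => simp [pvRender]
  | cons c cs ih =>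
    simp only [List.cons_append, pvRender, ih (i + 1), List.length_cons, List.append_assoc]
    congr 2
    push_cast
    ring_nf

theorem pvRender_congr (S T : List Int) (i : Int) (l : List Char)
    (h : ∀ j : Int, i ≤ j → j < i + l.length → (j ∈ S ↔ j ∈ T)) :
    pvRender S i l = pvRender T i l := by
  induction l generalizing i with
  | nil => rfl
  | cons c cs ih =>
    have h0 : i ∈ S ↔ i ∈ T := h i le_rfl (by simp)
    have htail : pvRender S (i + 1) cs = pvRender T (i + 1) cs := by
      refine ih (i + 1) (fun j hj1 hj2 => ?_)
      refine h j (by omega) ?_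
      simp only [List.length_cons] at *
      push_cast at hj2 ⊢
      omega
    simp only [pvRender, h0, htail]

theorem pv_flatten_map_enumerate (S : List Int) (cs : List Char) (s : Int) :
    ((PySem.List.enumerate cs s).map
      (fun ic => if ic.1 ∈ S then pvWrap ic.2 else [ic.2])).flatten = pvRender S s cs := by
  induction cs generalizing s with
  | nil => rfl
  | cons c cs ih =>
    simp [PySem.List.enumerate_cons, pvRender, ih (s + 1)]

-- the A-side fold equals the canonical rendering with membership in `positions`
theorem pvA_eq (text : String) (positions : List Int) :
    highlight_matches text positions = String.ofList (pvRender positions 0 text.toList) := by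
  unfold highlight_matches
  split_ifs with h
  · subst h
    rw [pvRender_no_mem _ _ _ (by intro k _ hk; simp at hk)]
    simp [String.ofList]
  · have hfun : (fun (acc : List (List Char)) (ic : Int × Char) =>
        if ic.1 ∈ PySem.Set.ofList positions then acc ++ [pvWrap ic.2] else acc ++ [[ic.2]])
        = (fun acc ic => acc ++ [if ic.1 ∈ PySem.Set.ofList positions then pvWrap ic.2 else [ic.2]]) := by
      funext acc ic; split <;> rfl
    simp only [hfun]
    rw [PySem.List.foldl_append_singleton_eq_map]
    simp only [List.nil_append]
    rw [pvJoin_eq_flatten, pv_flatten_map_enumerate]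
    congr 1
    refine pvRender_congr _ _ _ _ (fun j _ _ => ?_)
    exact PySem.Set.mem_ofList positions j

-- the B-side loop, run from cursor `prev`, renders the suffix of the text from index `prev`
theorem pvB_loop (cs : List Char) (ps : List Int) (prev : Int) (parts : List (List Char))
    (hprev : 0 ≤ prev)
    (hsorted : ps.Pairwise (· < ·))
    (hin : ∀ p ∈ ps, prev ≤ p ∧ p < (cs.length : Int)) :
    PySem.Chars.join []
      ((ps.foldl
          (fun (st : Int × List (List Char)) p =>
            (p + 1, st.2 ++ [PySem.List.slice cs (some st.1) (some p), pvWrap (PySem.List.pyGetD cs p ' ')]))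
          (prev, parts)).2
        ++ [PySem.List.slice cs
              (some (ps.foldl
                (fun (st : Int × List (List Char)) p =>
                  (p + 1, st.2 ++ [PySem.List.slice cs (some st.1) (some p), pvWrap (PySem.List.pyGetD cs p ' ')]))
                (prev, parts)).1) none])
    = PySem.Chars.join [] parts ++ pvRender ps prev (cs.drop prev.toNat) := by
  induction ps generalizing prev parts with
  | nil =>
    simp only [List.foldl_nil, PySem.List.slice_from cs hprev, pvJoin_eq_flatten]
    rw [pvRender_no_mem _ _ _ (by intro k _ hk; simp at hk)]
    simp
  | cons p ps ih =>
    have hp := hin p (by simp)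
    have hp0 : 0 ≤ p := le_trans hprev hp.1
    have hplen : p.toNat < cs.length := by omega
    have hps : ∀ q ∈ ps, p + 1 ≤ q ∧ q < (cs.length : Int) := by
      intro q hq
      exact ⟨by have := (List.pairwise_cons.1 hsorted).1 q hq; omega, (hin q (by simp [hq])).2⟩
    simp only [List.foldl_cons]
    rw [ih (p + 1) _ (by omega) (List.pairwise_cons.1 hsorted).2 hps]
    -- decompose the suffix  cs.drop prev = (run before p) ++ cs[p] :: (rest after p)
    have hsplit : cs.drop prev.toNat
        = (cs.drop prev.toNat).take (p.toNat - prev.toNat) ++ cs[p.toNat] :: cs.drop (p.toNat + 1) := by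
      conv_lhs => rw [← List.take_append_drop (p.toNat - prev.toNat) (cs.drop prev.toNat)]
      congr 1
      rw [List.drop_drop]
      have hpp : prev.toNat + (p.toNat - prev.toNat) = p.toNat := by omega
      rw [hpp]
      exact List.drop_eq_getElem_cons hplen
    conv_rhs => rw [hsplit]
    rw [pvRender_append]
    have hlen : ((cs.drop prev.toNat).take (p.toNat - prev.toNat)).length = p.toNat - prev.toNat := by
      simp; omega
    rw [hlen]
    have hidx : prev + ((p.toNat - prev.toNat : Nat) : Int) = p := by push_cast; omega
    rw [hidx]
    -- the run before p contains no highlighted position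
    rw [pvRender_no_mem (p :: ps) prev _ (by
      intro k hk hmem
      rw [hlen] at hk
      rcases List.mem_cons.1 hmem with h | h
      · omega
      · have := (hps _ h).1
        omega)]
    -- p itself is highlighted, the tail rendering ignores p
    simp only [pvRender]
    rw [if_pos (List.mem_cons_self (a := p) (l := ps))]
    rw [pvRender_congr (p :: ps) ps (p + 1) _ (by
      intro j hj _
      simp only [List.mem_cons]
      constructor
      · rintro (rfl | h)
        · omega
        · exact h
      · exact fun h => Or.inr h)]
    -- identify the slice and the indexing with their list forms
    rw [PySem.List.slice_toNat cs hprev hp0, PySem.List.pyGetD_of_nonneg cs ' ' hp0,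
        List.getD_eq_getElem cs ' ' hplen]
    have ht : ((p : Int) + 1).toNat = p.toNat + 1 := by omega
    rw [ht]
    simp only [pvJoin_eq_flatten, List.flatten_append, List.flatten_cons, List.flatten_nil,
      List.append_assoc, List.append_nil]

-- ===== VERDICT (by name: the statement is the Claim_ definition above) =====
theorem highlight_matches_spec : Claim_equal_highlight_matches := by
  intro text positions _
  unfold Spec_highlight_matches
  rw [pvA_eq]
  simp only [highlight_matches_alt]
  have hpair := PySem.List.sorted_ofList_pairwise_lt
    (positions.filter (fun p => 0 ≤ p && p < (text.toList.length : Int)))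
  have hmemv : ∀ j : Int,
      (j ∈ PySem.List.sorted (PySem.Set.ofList (positions.filter (fun p => 0 ≤ p && p < (text.toList.length : Int)))) (fun x => x) false)
      ↔ (j ∈ positions ∧ 0 ≤ j ∧ j < (text.toList.length : Int)) := by
    intro j
    rw [PySem.List.mem_sorted, PySem.Set.mem_ofList, List.mem_filter]
    simp
  rw [pvB_loop text.toList _ 0 [] le_rfl hpair
    (fun p hp => by have := (hmemv p).1 hp; exact ⟨this.2.1, this.2.2⟩)]
  simp only [pvJoin_eq_flatten, List.flatten_nil, List.nil_append, Int.toNat_zero, List.drop_zero]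
  congr 1
  refine pvRender_congr _ _ _ _ (fun j hj1 hj2 => ?_)
  rw [hmemv j]
  constructor
  · intro h; exact ⟨h, hj1, by omega⟩
  · exact fun h => h.1
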